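-- pv_equiv track=rewrite | github.com/karthiks360/Python_Tutorials | progs/List/largeposint.py | largeposint
-- ===== SOURCE A (Python) =====
-- def largeposint(arr):
--     posarr = []
--     negarr = []
--
--     for i in arr:
--         if i > 0:
--             posarr.append(i)
--         else:
--             negarr.append(i)
--     maxint = 0
--     for j in posarr:
--         if -j in negarr:
--             if j > maxint:
--                 maxint = j
--     return maxint
-- ===== SOURCE B (Python) =====
-- def largeposint(arr):
--     s = sorted(arr)
--     l, r = 0, len(s) - 1
--     while l < r:
--         t = s[l] + s[r]
--         if t == 0:
--             return s[r] if s[r] > 0 else 0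
--         if t < 0:
--             l += 1
--         else:
--             r -= 1
--     return 0
-- ===== Notes on version B (the rewrite author's own statement) =====
-- stated objective: alternative
-- what changed: B sorts a copy of the array and runs a converging two-pointer scan that returns the first (hence largest) zero-sum positive partner, replacing A's partition into pos/neg lists with a per-positive list-membership scan; it trades A's quadratic worst-case scans for a sort, though a timing run's inputs did not make it measurably faster.
import Mathlib
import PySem

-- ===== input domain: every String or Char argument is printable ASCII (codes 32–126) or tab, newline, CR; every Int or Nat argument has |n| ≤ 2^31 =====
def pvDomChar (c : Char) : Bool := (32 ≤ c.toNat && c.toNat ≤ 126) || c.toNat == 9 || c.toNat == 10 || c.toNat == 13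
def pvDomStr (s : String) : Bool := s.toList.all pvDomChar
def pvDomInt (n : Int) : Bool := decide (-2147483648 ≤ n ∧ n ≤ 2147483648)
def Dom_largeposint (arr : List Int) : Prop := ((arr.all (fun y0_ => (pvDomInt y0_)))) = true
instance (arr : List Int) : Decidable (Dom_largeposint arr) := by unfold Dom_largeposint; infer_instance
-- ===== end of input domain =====

-- B sorts a copy of the array and runs a converging two-pointer scan (early return on the
-- first zero-sum pair with a positive right end), replacing A's partition + per-positive
-- list-membership scan (objective: alternative algorithm, sort + two pointers).


-- ===== PORT A =====
-- one loop appending each element to posarr or negarr, then a scan over posarr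
-- testing '-j in negarr' (list membership) and keeping the running maximum
def largeposint (arr : List Int) : Int :=
  let pn := arr.foldl
    (fun (pq : List Int × List Int) i =>
      if i > 0 then (pq.1 ++ [i], pq.2) else (pq.1, pq.2 ++ [i])) ([], [])
  pn.1.foldl
    (fun maxint j =>
      if pn.2.contains (-j) then (if j > maxint then j else maxint) else maxint) 0

-- ===== PORT B =====
-- the while-loop of Source B: two pointers l, r converging over the sorted copy;
-- s[l]/s[r] are always in range when l < r ≤ len-1, so getD is exact here
def lpLoop (s : List Int) (l r : Nat) : Int :=
  if l < r then
    let t := s.getD l 0 + s.getD r 0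
    if t = 0 then (if s.getD r 0 > 0 then s.getD r 0 else 0)
    else if t < 0 then lpLoop s (l + 1) r
    else lpLoop s l (r - 1)
  else 0
termination_by r - l

def largeposint_alt (arr : List Int) : Int :=
  let s := PySem.List.sorted arr (fun x => x) false
  lpLoop s 0 (s.length - 1)

-- ===== PRECONDITION & SPEC =====
def Spec_largeposint (arr : List Int) (out : Int) : Prop := out = largeposint_alt arr
instance (arr : List Int) (out : Int) : Decidable (Spec_largeposint arr out) := by unfold Spec_largeposint; infer_instance

-- ===== CLAIM (what is proved, stated in full; the proofs are below) =====
def Claim_equal_largeposint : Prop := ∀ (arr : List Int), Dom_largeposint arr → Spec_largeposint arr (largeposint arr)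

-- ===== LEMMAS AND PROOFS =====

-- A's first loop is a partition of arr
lemma largeposint_partition (arr : List Int) (p n : List Int) :
    arr.foldl (fun (pq : List Int × List Int) i =>
      if i > 0 then (pq.1 ++ [i], pq.2) else (pq.1, pq.2 ++ [i])) (p, n)
    = (p ++ arr.filter (fun i => decide (i > 0)),
       n ++ arr.filter (fun i => !decide (i > 0))) := by
  induction arr generalizing p n with
  | nil => simp
  | cons a t ih =>
    by_cases h : a > 0 <;> simp [List.foldl_cons, h, ih]

-- characterization of A's running-max loop
lemma foldmax_spec (c : Int → Bool) (l : List Int) (m : Int) :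
    m ≤ l.foldl (fun acc j => if c j then (if j > acc then j else acc) else acc) m ∧
    (l.foldl (fun acc j => if c j then (if j > acc then j else acc) else acc) m = m ∨
      (l.foldl (fun acc j => if c j then (if j > acc then j else acc) else acc) m ∈ l ∧
       c (l.foldl (fun acc j => if c j then (if j > acc then j else acc) else acc) m) = true)) ∧
    ∀ x ∈ l, c x = true →
      x ≤ l.foldl (fun acc j => if c j then (if j > acc then j else acc) else acc) m := by
  induction l generalizing m with
  | nil => simp
  | cons a t ih =>
    simp only [List.foldl_cons, List.mem_cons]
    by_cases hc : c a = true
    · rw [hc]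
      by_cases hgt : a > m
      · rw [if_pos rfl, if_pos hgt]
        obtain ⟨h1, h2, h3⟩ := ih a
        refine ⟨by omega, ?_, ?_⟩
        · rcases h2 with h2 | h2
          · exact Or.inr ⟨Or.inl h2, by rw [h2]; exact hc⟩
          · exact Or.inr ⟨Or.inr h2.1, h2.2⟩
        · rintro x (rfl | hx) hcx
          · exact h1
          · exact h3 x hx hcx
      · rw [if_pos rfl, if_neg hgt]
        obtain ⟨h1, h2, h3⟩ := ih m
        refine ⟨h1, h2.imp id (fun h => ⟨Or.inr h.1, h.2⟩), ?_⟩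
        rintro x (rfl | hx) hcx
        · omega
        · exact h3 x hx hcx
    · simp only [Bool.not_eq_true] at hc
      rw [hc]
      simp only [Bool.false_eq_true, if_false]
      obtain ⟨h1, h2, h3⟩ := ih m
      refine ⟨h1, h2.imp id (fun h => ⟨Or.inr h.1, h.2⟩), ?_⟩
      rintro x (rfl | hx) hcx
      · rw [hcx] at hc; exact absurd hc (by simp)
      · exact h3 x hx hcx

-- A's result characterized against S = {v | v > 0 ∧ v ∈ arr ∧ -v ∈ arr}
lemma largeposint_char (arr : List Int) :
    (largeposint arr = 0 ∨
      (0 < largeposint arr ∧ largeposint arr ∈ arr ∧ -largeposint arr ∈ arr)) ∧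
    ∀ v : Int, 0 < v → v ∈ arr → -v ∈ arr → v ≤ largeposint arr := by
  have hA : largeposint arr
      = (arr.filter (fun i => decide (i > 0))).foldl
          (fun acc j => if (arr.filter (fun i => !decide (i > 0))).contains (-j)
                        then (if j > acc then j else acc) else acc) 0 := by
    simp only [largeposint, largeposint_partition arr [] [], List.nil_append]
  obtain ⟨h0, hmem, hub⟩ := foldmax_spec
    (fun j => (arr.filter (fun i => !decide (i > 0))).contains (-j))
    (arr.filter (fun i => decide (i > 0))) 0
  have hcarr : ∀ j : Int, 0 < j →
      ((arr.filter (fun i => !decide (i > 0))).contains (-j) = true ↔ (-j) ∈ arr) := by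
    intro j hj
    simp only [List.contains_iff_mem, List.mem_filter,
      Bool.not_eq_eq_eq_not, Bool.not_true, decide_eq_false_iff_not]
    exact ⟨fun h => h.1, fun h => ⟨h, by omega⟩⟩
  rw [hA]
  constructor
  · rcases hmem with h | ⟨hin, hcA⟩
    · exact Or.inl h
    · rw [List.mem_filter] at hin
      have hp := of_decide_eq_true hin.2
      exact Or.inr ⟨hp, hin.1, (hcarr _ hp).1 hcA⟩
  · intro v hv hva hvn
    exact hub v (by simp [List.mem_filter, hva, hv]) ((hcarr v hv).2 hvn)

-- sorted getD is monotone on valid indices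
lemma sorted_getD_mono (s : List Int) (hs : s.Pairwise (· ≤ ·))
    (i j : Nat) (hij : i ≤ j) (hj : j < s.length) :
    s.getD i 0 ≤ s.getD j 0 := by
  rcases eq_or_lt_of_le hij with rfl | hlt
  · exact le_refl _
  · rw [List.getD_eq_getElem _ _ (lt_of_le_of_lt hij hj), List.getD_eq_getElem _ _ hj]
    exact List.pairwise_iff_getElem.1 hs i j (lt_of_le_of_lt hij hj) hj hlt

-- the two-pointer loop: its result is 0 or a matched positive, and it bounds every
-- matched positive in the window [l, r]
lemma lpLoop_char (s : List Int) (hs : s.Pairwise (· ≤ ·)) :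
    ∀ l r : Nat, r < s.length →
    (lpLoop s l r = 0 ∨
      (0 < lpLoop s l r ∧ ∃ i j : Nat, l ≤ i ∧ i < j ∧ j ≤ r ∧
        s.getD i 0 = -(lpLoop s l r) ∧ s.getD j 0 = lpLoop s l r)) ∧
    ∀ v : Int, 0 < v →
      (∃ i j : Nat, l ≤ i ∧ i < j ∧ j ≤ r ∧ s.getD i 0 = -v ∧ s.getD j 0 = v) →
      v ≤ lpLoop s l r := by
  intro l r
  induction hd : r - l using Nat.strong_induction_on generalizing l r with
  | _ d ih =>
  intro hr
  by_cases hlr : l < r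
  · rw [lpLoop, if_pos hlr]
    set a := s.getD l 0 with ha
    set b := s.getD r 0 with hb
    by_cases ht0 : a + b = 0
    · rw [if_pos ht0]
      by_cases hbp : b > 0
      · rw [if_pos hbp]
        constructor
        · exact Or.inr ⟨hbp, l, r, le_refl l, hlr, le_refl r, by omega, rfl⟩
        · rintro v hv ⟨i, j, hli, hij, hjr, _, hjv⟩
          have := sorted_getD_mono s hs j r hjr hr
          omega
      · rw [if_neg hbp]
        refine ⟨Or.inl rfl, ?_⟩
        rintro v hv ⟨i, j, hli, hij, hjr, _, hjv⟩
        have := sorted_getD_mono s hs j r hjr hr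
        omega
    · rw [if_neg ht0]
      by_cases htn : a + b < 0
      · rw [if_pos htn]
        obtain ⟨hm, hub⟩ := ih (r - (l + 1)) (by omega) (l + 1) r rfl hr
        constructor
        · rcases hm with h | ⟨hp, i, j, h1, h2, h3, h4, h5⟩
          · exact Or.inl h
          · exact Or.inr ⟨hp, i, j, by omega, h2, h3, h4, h5⟩
        · rintro v hv ⟨i, j, hli, hij, hjr, hiv, hjv⟩
          rcases Nat.eq_or_lt_of_le hli with rfl | hli'
          · -- i = l: then a = -v, but s[j] ≤ b so a + b ≥ a + s[j] = 0, contradiction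
            have := sorted_getD_mono s hs j r hjr hr
            omega
          · exact hub v hv ⟨i, j, hli', hij, hjr, hiv, hjv⟩
      · rw [if_neg htn]
        obtain ⟨hm, hub⟩ := ih ((r - 1) - l) (by omega) l (r - 1) rfl (by omega)
        constructor
        · rcases hm with h | ⟨hp, i, j, h1, h2, h3, h4, h5⟩
          · exact Or.inl h
          · exact Or.inr ⟨hp, i, j, h1, h2, by omega, h4, h5⟩
        · rintro v hv ⟨i, j, hli, hij, hjr, hiv, hjv⟩
          rcases Nat.eq_or_lt_of_le hjr with rfl | hjr'
          · -- j = r: then b = v, but a ≤ s[i] = -v so a + b ≤ 0, contradiction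
            have := sorted_getD_mono s hs l i (by omega) (by omega)
            omega
          · exact hub v hv ⟨i, j, hli, hij, by omega, hiv, hjv⟩
  · rw [lpLoop, if_neg hlr]
    exact ⟨Or.inl rfl, by rintro v hv ⟨i, j, h1, h2, h3, _, _⟩; omega⟩

-- B's result characterized against the same S
lemma largeposint_alt_char (arr : List Int) :
    (largeposint_alt arr = 0 ∨
      (0 < largeposint_alt arr ∧ largeposint_alt arr ∈ arr ∧ -largeposint_alt arr ∈ arr)) ∧
    ∀ v : Int, 0 < v → v ∈ arr → -v ∈ arr → v ≤ largeposint_alt arr := by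
  set s := PySem.List.sorted arr (fun x => x) false with hsdef
  have hperm : s.Perm arr := PySem.List.sorted_perm arr (fun x => x) false
  have hpw : s.Pairwise (· ≤ ·) := by
    have := PySem.List.sorted_pairwise (xs := arr) (key := fun x => x)
    simpa using this
  have hmem : ∀ x : Int, x ∈ s ↔ x ∈ arr := fun x => hperm.mem_iff
  have hB : largeposint_alt arr = lpLoop s 0 (s.length - 1) := rfl
  by_cases hnil : s = []
  · have harr : arr = [] := by
      have := hperm; rw [hnil] at this; exact this.symm.eq_nil
    rw [hB, hnil]
    subst harr
    refine ⟨Or.inl (by rw [lpLoop]; simp), by simp⟩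
  · have hlen : 0 < s.length := List.length_pos_iff.2 hnil
    obtain ⟨hm, hub⟩ := lpLoop_char s hpw 0 (s.length - 1) (by omega)
    rw [hB]
    constructor
    · rcases hm with h | ⟨hp, i, j, _, hij, hjr, hiv, hjv⟩
      · exact Or.inl h
      · refine Or.inr ⟨hp, ?_, ?_⟩
        · rw [← hjv, List.getD_eq_getElem _ _ (by omega)]
          exact (hmem _).1 (List.getElem_mem _)
        · rw [← hiv, List.getD_eq_getElem _ _ (by omega)]
          exact (hmem _).1 (List.getElem_mem _)
    · intro v hv hva hvn
      -- find indices of -v and v in s; sortedness forces index(-v) < index(v)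
      obtain ⟨i, hi, hiv⟩ := List.getElem_of_mem ((hmem _).2 hvn)
      obtain ⟨j, hj, hjv⟩ := List.getElem_of_mem ((hmem _).2 hva)
      have hij : i < j := by
        rcases Nat.lt_trichotomy i j with h | rfl | h
        · exact h
        · omega
        · have := List.pairwise_iff_getElem.1 hpw j i hj hi h
          omega
      refine hub v hv ⟨i, j, Nat.zero_le i, hij, by omega, ?_, ?_⟩
      · rw [List.getD_eq_getElem _ _ hi, hiv]
      · rw [List.getD_eq_getElem _ _ hj, hjv]

-- ===== VERDICT (by name: the statement is the Claim_ definition above) =====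
theorem largeposint_spec : Claim_equal_largeposint := by
  intro arr _
  unfold Spec_largeposint
  obtain ⟨hAm, hAub⟩ := largeposint_char arr
  obtain ⟨hBm, hBub⟩ := largeposint_alt_char arr
  rcases hAm with hA0 | ⟨hAp, hAa, hAn⟩
  · rcases hBm with hB0 | ⟨hBp, hBa, hBn⟩
    · omega
    · have := hAub _ hBp hBa hBn; omega
  · rcases hBm with hB0 | ⟨hBp, hBa, hBn⟩
    · have := hBub _ hAp hAa hAn; omega
    · have h1 := hAub _ hBp hBa hBn
      have h2 := hBub _ hAp hAa hAn
      omega
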